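-- pv_equiv track=rewrite | github.com/hienlephan2003/cs112 | Wecode#4DP/challenge#9/main.py | unique_combination_sums
-- ===== SOURCE A (Python) =====
-- def unique_combination_sums(arr):
--     results = []
--
--     # Hàm quay lui để tạo các tổ hợp
--     def backtrack(path, start, subset_sum):
--         if subset_sum not in results:
--             results.append(subset_sum)
--
--         for i in range(start, len(arr)):
--             path.append(arr[i])
--             subset_sum += arr[i]
--             backtrack(path, i + 1, subset_sum)
--             path.pop()
--             subset_sum -= arr[i]
--
--     # Sắp xếp mảng đầu vào để loại bỏ các tổ hợp trùng nhau
--     arr.sort()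
--
--     # Gọi hàm quay lui ban đầu
--     backtrack([], 0, 0)
--
--     return results
-- ===== SOURCE B (Python) =====
-- def unique_combination_sums(arr):
--     arr.sort()
--     results = []
--     n = len(arr)
--     stack = [(0, 0)]
--     while stack:
--         start, s = stack.pop()
--         if s not in results:
--             results.append(s)
--         for i in reversed(range(start, n)):
--             stack.append((i + 1, s + arr[i]))
--     return results
-- ===== Notes on version B (the rewrite author's own statement) =====
-- stated objective: alternative
-- what changed: Replaced the recursive backtracking (nested closure mutating results) with an iterative DFS over an explicit stack of (start, subset_sum) frames, pushing children in reversed index order so the preorder first-appearance order of sums is preserved.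
import Mathlib
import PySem

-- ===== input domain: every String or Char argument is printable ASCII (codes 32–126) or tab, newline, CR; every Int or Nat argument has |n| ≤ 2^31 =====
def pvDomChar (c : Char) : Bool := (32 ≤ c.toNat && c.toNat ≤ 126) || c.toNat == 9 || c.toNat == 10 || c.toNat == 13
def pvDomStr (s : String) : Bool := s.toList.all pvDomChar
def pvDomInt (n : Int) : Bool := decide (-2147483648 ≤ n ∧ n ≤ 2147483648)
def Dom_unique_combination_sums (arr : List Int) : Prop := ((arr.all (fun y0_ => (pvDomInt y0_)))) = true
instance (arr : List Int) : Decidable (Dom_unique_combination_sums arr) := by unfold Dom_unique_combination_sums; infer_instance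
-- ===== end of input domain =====

-- B replaces A's recursive backtracking with an iterative explicit-stack DFS (same preorder, same
-- list-membership dedup); equivalence is about the RETURN value — both Pythons also sort arr in place.

-- ===== PORT A =====
-- A's backtrack: visit subset_sum, then for i in range(start, len(arr)) recurse with (i+1, s+arr[i]).
-- path is write-only and subset_sum is restored after each iteration, so they are not state here.
mutual
def pvBtA (arr : List Int) (start : Nat) (s : Int) (res : List Int) : List Int :=
  pvLoopA arr start s (if res.contains s then res else res ++ [s])
termination_by (arr.length + 1 - start, 1)
def pvLoopA (arr : List Int) (i : Nat) (s : Int) (res : List Int) : List Int :=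
  if _h : i < arr.length then
    pvLoopA arr (i + 1) s (pvBtA arr (i + 1) (s + arr.getD i 0) res)
  else res
termination_by (arr.length + 1 - i, 0)
decreasing_by
  all_goals simp_wf; omega
end

def unique_combination_sums (arr : List Int) : List Int :=
  pvBtA (PySem.List.sorted arr (fun x => x) false) 0 0 []

-- ===== PORT B =====
-- stack frame weight 2^(n - start); a frame's children weigh strictly less in total (termination measure)
def pvWeight (n : Nat) (stack : List (Nat × Int)) : Nat :=
  (stack.map (fun p => 2 ^ (n - p.1))).sum

lemma pvChildSum (n : Nat) : ∀ (k st : Nat), st + k = n →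
    ((List.range' st k).map (fun i => (2 : Nat) ^ (n - (i + 1)))).sum < 2 ^ k := by
  intro k
  induction k with
  | zero => intro st _; simp
  | succ k ih =>
      intro st hst
      rw [List.range'_succ]
      have h1 : n - (st + 1) = k := by omega
      have h2 := ih (st + 1) (by omega)
      simp only [List.map_cons, List.sum_cons, h1, pow_succ]
      omega

lemma pvWeight_step (n st : Nat) (s : Int) (f : Nat → Int) (rest : List (Nat × Int)) :
    pvWeight n ((List.range' st (n - st)).map (fun i => (i + 1, f i)) ++ rest) <
      pvWeight n ((st, s) :: rest) := by
  simp only [pvWeight, List.map_append, List.sum_append, List.map_map, List.map_cons,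
    List.sum_cons, Function.comp_def]
  have h : ((List.range' st (n - st)).map (fun i => (2 : Nat) ^ (n - (i + 1)))).sum < 2 ^ (n - st) := by
    by_cases hst : st < n
    · exact pvChildSum n (n - st) st (by omega)
    · have : n - st = 0 := by omega
      simp [this]
  omega

-- while stack: pop (start, s); visit s; push frames (i+1, s+arr[i]) for i in reversed(range(start, n)).
-- Head of the Lean list is the stack top; pushing the reversed index range one frame at a time is
-- exactly prepending the frames in increasing index order, as written here.
def pvRunB (arr : List Int) (stack : List (Nat × Int)) (res : List Int) : List Int :=
  match stack with
  | [] => res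
  | (start, s) :: rest =>
      pvRunB arr
        ((List.range' start (arr.length - start)).map (fun i => (i + 1, s + arr.getD i 0)) ++ rest)
        (if res.contains s then res else res ++ [s])
termination_by pvWeight arr.length stack
decreasing_by exact pvWeight_step arr.length start s _ rest

def unique_combination_sums_alt (arr : List Int) : List Int :=
  pvRunB (PySem.List.sorted arr (fun x => x) false) [(0, 0)] []

-- ===== PRECONDITION & SPEC =====
def Spec_unique_combination_sums (arr : List Int) (out : List Int) : Prop := out = unique_combination_sums_alt arr
instance (arr : List Int) (out : List Int) : Decidable (Spec_unique_combination_sums arr out) := by unfold Spec_unique_combination_sums; infer_instance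

-- ===== CLAIM (what is proved, stated in full; the proofs are below) =====
def Claim_equal_unique_combination_sums : Prop := ∀ (arr : List Int), Dom_unique_combination_sums arr → Spec_unique_combination_sums arr (unique_combination_sums arr)

-- ===== LEMMAS AND PROOFS =====
-- pvProcA processes a stack of frames sequentially through A's backtrack
def pvProcA (arr : List Int) : List (Nat × Int) → List Int → List Int
  | [], res => res
  | (st, s) :: rest, res => pvProcA arr rest (pvBtA arr st s res)

lemma pvProcA_children (arr : List Int) (s : Int) :
    ∀ (k st : Nat), st + k = arr.length → ∀ (stack : List (Nat × Int)) (res : List Int),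
      pvProcA arr ((List.range' st k).map (fun i => (i + 1, s + arr.getD i 0)) ++ stack) res =
        pvProcA arr stack (pvLoopA arr st s res) := by
  intro k
  induction k with
  | zero =>
      intro st hst stack res
      rw [pvLoopA.eq_def]
      simp [show ¬ st < arr.length by omega]
  | succ k ih =>
      intro st hst stack res
      rw [List.range'_succ, List.map_cons, List.cons_append, pvProcA]
      rw [ih (st + 1) (by omega)]
      conv_rhs => rw [pvLoopA.eq_def]
      simp [show st < arr.length by omega]

lemma pvRunB_eq_proc (arr : List Int) :
    ∀ (N : Nat) (stack : List (Nat × Int)) (res : List Int),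
      pvWeight arr.length stack ≤ N → pvRunB arr stack res = pvProcA arr stack res := by
  intro N
  induction N with
  | zero =>
      intro stack res h
      match stack with
      | [] => rw [pvRunB]; rfl
      | (st, s) :: rest =>
          exfalso
          have : 0 < (2 : Nat) ^ (arr.length - st) := Nat.two_pow_pos _
          simp [pvWeight] at h
  | succ N ih =>
      intro stack res h
      match stack with
      | [] => rw [pvRunB]; rfl
      | (st, s) :: rest =>
          rw [pvRunB]
          have hlt := pvWeight_step arr.length st s (fun i => s + arr.getD i 0) rest
          rw [ih _ _ (by omega)]
          by_cases hst : st < arr.length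
          · rw [pvProcA_children arr s (arr.length - st) st (by omega)]
            rw [pvProcA, pvBtA.eq_def]
          · have h0 : arr.length - st = 0 := by omega
            rw [pvProcA, pvBtA.eq_def]
            conv_rhs => rw [pvLoopA.eq_def]
            simp [h0, hst]

theorem pv_eq (arr : List Int) : unique_combination_sums arr = unique_combination_sums_alt arr := by
  unfold unique_combination_sums unique_combination_sums_alt
  rw [pvRunB_eq_proc _ (pvWeight _ [(0, 0)]) _ _ le_rfl]
  rfl

-- ===== VERDICT (by name: the statement is the Claim_ definition above) =====
theorem unique_combination_sums_spec : Claim_equal_unique_combination_sums := by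
  intro arr _
  unfold Spec_unique_combination_sums
  exact pv_eq arr
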